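-- pv_equiv track=rewrite | github.com/zachkleine/DFS | cashgrinder.py | order_lineup
-- ===== SOURCE A (Python) =====
-- def order_lineup(players):
--     """Reorder lineup into standard DFS order."""
--     order = ["QB", "RB", "RB", "WR", "WR", "WR", "TE", "FLEX", "DST"]
--     ordered = []
--     used = set()
--
--     for pos in order:
--         for p in players:
--             if p[0] == pos and p not in used:
--                 ordered.append(p)
--                 used.add(p)
--                 break
--     return ordered
-- ===== SOURCE B (Python) =====
-- def order_lineup(players):
--     """Reorder lineup into standard DFS order."""
--     distinct = list(dict.fromkeys(players))
--     ordered = []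
--     for pos, k in [("QB", 1), ("RB", 2), ("WR", 3), ("TE", 1), ("FLEX", 1), ("DST", 1)]:
--         ordered += [p for p in distinct if p[0] == pos][:k]
--     return ordered
-- ===== Notes on version B (the rewrite author's own statement) =====
-- stated objective: alternative
-- what changed: B dedups the player list once (dict.fromkeys) and then, for each position group of the fixed order, appends the first k distinct players of that position in one filtered take, replacing A's per-slot rescan of the whole list with a growing used-set.
import Mathlib
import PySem

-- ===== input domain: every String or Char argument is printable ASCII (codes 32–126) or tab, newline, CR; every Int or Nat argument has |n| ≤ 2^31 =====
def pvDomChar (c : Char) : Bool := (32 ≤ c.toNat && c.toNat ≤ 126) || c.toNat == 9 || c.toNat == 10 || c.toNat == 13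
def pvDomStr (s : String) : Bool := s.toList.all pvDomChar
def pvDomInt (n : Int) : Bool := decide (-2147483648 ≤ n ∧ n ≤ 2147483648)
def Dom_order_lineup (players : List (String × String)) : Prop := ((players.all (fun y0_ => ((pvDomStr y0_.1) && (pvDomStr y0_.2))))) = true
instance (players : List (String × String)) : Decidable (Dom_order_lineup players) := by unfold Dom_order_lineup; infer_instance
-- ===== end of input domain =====

-- B dedups the player list once and then takes a fixed number of distinct players per
-- position group (1 QB, 2 RB, 3 WR, 1 TE, 1 FLEX, 1 DST), instead of A's rescan of the
-- whole list with a growing `used` set for each of the 9 slots (alternative decomposition).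


-- ===== PORT A =====
-- the fixed DFS position order
def dfsOrder : List String := ["QB", "RB", "RB", "WR", "WR", "WR", "TE", "FLEX", "DST"]

-- A's inner loop: first player matching pos and not in `used` (break on first hit)
def aStep (players : List (String × String))
    (st : List (String × String) × PySem.Set (String × String)) (pos : String) :
    List (String × String) × PySem.Set (String × String) :=
  match players.find? (fun p => p.1 == pos && !(PySem.Set.contains st.2 p)) with
  | some p => (st.1 ++ [p], PySem.Set.add st.2 p)
  | none => st

def order_lineup (players : List (String × String)) : List (String × String) :=
  (dfsOrder.foldl (aStep players) ([], PySem.Set.empty)).1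

-- ===== PORT B =====
-- Source B's slot table: each position with how many slots it fills
def slotCounts : List (String × Nat) :=
  [("QB", 1), ("RB", 2), ("WR", 3), ("TE", 1), ("FLEX", 1), ("DST", 1)]

-- Source B: distinct = list(dict.fromkeys(players)); then per slot group
-- ordered += [p for p in distinct if p[0] == pos][:k]
def order_lineup_alt (players : List (String × String)) : List (String × String) :=
  let distinct := PySem.List.dedup players
  slotCounts.foldl
    (fun ordered pk => ordered ++ (distinct.filter (fun p => p.1 == pk.1)).take pk.2) []

-- ===== PRECONDITION & SPEC =====
def Spec_order_lineup (players : List (String × String)) (out : List (String × String)) : Prop := out = order_lineup_alt players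
instance (players : List (String × String)) (out : List (String × String)) : Decidable (Spec_order_lineup players out) := by unfold Spec_order_lineup; infer_instance

-- ===== CLAIM (what is proved, stated in full; the proofs are below) =====
def Claim_equal_order_lineup : Prop := ∀ (players : List (String × String)), Dom_order_lineup players → Spec_order_lineup players (order_lineup players)

-- ===== LEMMAS AND PROOFS =====

-- folding Set.add over t onto s appends the first occurrences of t's new elements
lemma foldl_add_eq {α : Type} [BEq α] [LawfulBEq α] (n : Nat) :
    ∀ (t : List α), t.length ≤ n → ∀ (s : List α),
      t.foldl PySem.Set.add s = s ++ PySem.Set.ofList (t.filter (fun x => !s.contains x)) := by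
  induction n with
  | zero =>
    intro t ht s
    have : t = [] := List.length_eq_zero_iff.mp (Nat.le_zero.mp ht)
    subst this; simp [PySem.Set.ofList_eq_foldl]
  | succ n ih =>
    intro t ht s
    match t with
    | [] => simp [PySem.Set.ofList_eq_foldl]
    | a :: t' =>
      simp only [List.length_cons, Nat.add_le_add_iff_right] at ht
      by_cases hc : s.contains a = true
      · have hmem : a ∈ s := by simpa using hc
        have hadd : PySem.Set.add s a = s := by simp [PySem.Set.add, hmem]
        simp only [List.foldl_cons, hadd, List.filter_cons, hc, Bool.not_true]
        simp only [Bool.false_eq_true, if_false]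
        exact ih t' ht s
      · have hcf : s.contains a = false := by simpa using hc
        have hmem : a ∉ s := by simpa using hcf
        have hadd : PySem.Set.add s a = s ++ [a] := by simp [PySem.Set.add, hmem]
        simp only [List.foldl_cons, hadd, List.filter_cons, hcf, Bool.not_false, if_true]
        rw [ih t' ht (s ++ [a])]
        have hfuse : t'.filter (fun x => !(s ++ [a]).contains x)
            = (t'.filter (fun x => !s.contains x)).filter (fun x => !(x == a)) := by
          rw [List.filter_filter]
          apply List.filter_congr
          intro x _
          by_cases hxa : x = a <;> simp [hxa, List.mem_append]
        rw [hfuse]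
        have hm : (t'.filter (fun x => !s.contains x)).length ≤ n :=
          le_trans (List.length_filter_le _ _) ht
        have hof : PySem.Set.ofList (a :: t'.filter (fun x => !s.contains x))
            = a :: PySem.Set.ofList ((t'.filter (fun x => !s.contains x)).filter (fun x => !(x == a))) := by
          rw [PySem.Set.ofList_eq_foldl, List.foldl_cons]
          have hadd0 : PySem.Set.add ([] : List α) a = [a] := by simp [PySem.Set.add]
          rw [hadd0, ih _ hm [a]]
          simp only [List.singleton_append, List.cons.injEq, true_and]
          congr 1
          apply List.filter_congr
          intro x _
          simp
        rw [hof]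
        simp

-- ofList keeps the head and dedups the tail against it
lemma ofList_cons' {α : Type} [BEq α] [LawfulBEq α] (a : α) (l : List α) :
    PySem.Set.ofList (a :: l) = a :: PySem.Set.ofList (l.filter (fun x => !(x == a))) := by
  rw [PySem.Set.ofList_eq_foldl, List.foldl_cons]
  have hadd0 : PySem.Set.add ([] : List α) a = [a] := by simp [PySem.Set.add]
  rw [hadd0, foldl_add_eq l.length l le_rfl [a]]
  simp only [List.singleton_append, List.cons.injEq, true_and]
  congr 1
  apply List.filter_congr
  intro x _
  simp

-- filtering a deduped list = deduping the filtered list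
lemma filter_ofList_aux {α : Type} [BEq α] [LawfulBEq α] (n : Nat) :
    ∀ (l : List α), l.length ≤ n → ∀ (q : α → Bool),
      (PySem.Set.ofList l).filter q = PySem.Set.ofList (l.filter q) := by
  induction n with
  | zero =>
    intro l hl q
    have : l = [] := List.length_eq_zero_iff.mp (Nat.le_zero.mp hl)
    subst this; simp [PySem.Set.ofList_eq_foldl]
  | succ n ih =>
    intro l hl q
    match l with
    | [] => simp [PySem.Set.ofList_eq_foldl]
    | a :: t =>
      simp only [List.length_cons, Nat.add_le_add_iff_right] at hl
      rw [ofList_cons']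
      have hlen : (t.filter (fun x => !(x == a))).length ≤ n :=
        le_trans (List.length_filter_le _ _) hl
      by_cases hq : q a = true
      · rw [List.filter_cons_of_pos hq, List.filter_cons_of_pos hq, ofList_cons']
        rw [ih _ hlen q]
        rw [List.filter_filter, List.filter_filter]
        congr 1
        congr 1
        apply List.filter_congr
        intro x _
        exact Bool.and_comm _ _
      · have hqf : q a = false := by simpa using hq
        rw [List.filter_cons_of_neg (by simp [hqf]), List.filter_cons_of_neg (by simp [hqf])]
        rw [ih _ hlen q, List.filter_filter]
        congr 1
        apply List.filter_congr
        intro x _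
        by_cases hxa : x = a
        · subst hxa; simp [hqf]
        · simp [hxa]

lemma filter_ofList {α : Type} [BEq α] [LawfulBEq α] (l : List α) (q : α → Bool) :
    (PySem.Set.ofList l).filter q = PySem.Set.ofList (l.filter q) :=
  filter_ofList_aux l.length l le_rfl q

-- find? ignores elements the predicate rejects for a reason the filter also rejects
lemma find?_filter_of_imp {α : Type} (p q : α → Bool)
    (h : ∀ x, q x = false → p x = false) :
    ∀ (t : List α), t.find? p = (t.filter q).find? p := by
  intro t
  induction t with
  | nil => rfl
  | cons b t ih =>
    by_cases hq : q b = true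
    · rw [List.filter_cons_of_pos hq]
      by_cases hp : p b = true
      · rw [List.find?_cons_of_pos hp, List.find?_cons_of_pos hp]
      · have hpf : p b = false := by simpa using hp
        rw [List.find?_cons_of_neg (by simp [hpf]), List.find?_cons_of_neg (by simp [hpf]), ih]
    · have hqf : q b = false := by simpa using hq
      have hpf : p b = false := h b hqf
      rw [List.filter_cons_of_neg (by simp [hqf]), List.find?_cons_of_neg (by simp [hpf]), ih]

-- find? with a conjunction = find? on the filtered list
lemma find?_conj {α : Type} (l : List α) (q r : α → Bool) :
    l.find? (fun x => q x && r x) = (l.filter q).find? r := by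
  induction l with
  | nil => rfl
  | cons a t ih =>
    by_cases hqa : q a = true
    · rw [List.filter_cons_of_pos hqa]
      by_cases hra : r a = true
      · rw [List.find?_cons_of_pos (by simp [hqa, hra]), List.find?_cons_of_pos hra]
      · have hrf : r a = false := by simpa using hra
        rw [List.find?_cons_of_neg (by simp [hrf]), List.find?_cons_of_neg (by simp [hrf]), ih]
    · have hqf : q a = false := by simpa using hqa
      rw [List.filter_cons_of_neg (by simp [hqf]), List.find?_cons_of_neg (by simp [hqf]), ih]

-- first element not among the first j distinct ones is the (j+1)-th distinct one
lemma find_dedup {α : Type} [BEq α] [LawfulBEq α] (n : Nat) :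
    ∀ (L : List α), L.length ≤ n → ∀ (v : List α) (j : Nat),
      (∀ x ∈ L, (v.contains x = true ↔ x ∈ (PySem.Set.ofList L).take j)) →
      L.find? (fun p => !(v.contains p)) = (PySem.Set.ofList L)[j]? := by
  induction n with
  | zero =>
    intro L hL v j _
    have : L = [] := List.length_eq_zero_iff.mp (Nat.le_zero.mp hL)
    subst this; simp [PySem.Set.ofList_eq_foldl]
  | succ n ih =>
    intro L hL v j hv
    match L with
    | [] => simp [PySem.Set.ofList_eq_foldl]
    | a :: t =>
      simp only [List.length_cons, Nat.add_le_add_iff_right] at hL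
      rw [ofList_cons'] at hv ⊢
      match j with
      | 0 =>
        have ham : a ∉ v := by
          have := hv a (by simp)
          simp only [List.take_zero, List.not_mem_nil, iff_false] at this
          simpa using this
        rw [List.find?_cons_of_pos (by simp [ham])]
        rfl
      | j + 1 =>
        have ham : a ∈ v := by
          have := hv a (by simp)
          rw [List.take_succ_cons] at this
          exact by simpa using this.mpr (List.mem_cons_self)
        rw [List.find?_cons_of_neg (by simp [ham])]
        have hskip : t.find? (fun p => !(v.contains p))
            = (t.filter (fun x => !(x == a))).find? (fun p => !(v.contains p)) := by
          apply find?_filter_of_imp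
          intro x hx
          have hxa : x = a := by simpa using hx
          subst hxa; simp [ham]
        rw [hskip]
        have hlen : (t.filter (fun x => !(x == a))).length ≤ n :=
          le_trans (List.length_filter_le _ _) hL
        rw [ih _ hlen v j ?_]
        · simp
        · intro x hxmem
          have hxa : ¬(x = a) := by
            have := (List.mem_filter.mp hxmem).2
            simpa using this
          have hxt : x ∈ a :: t := List.mem_cons_of_mem a (List.mem_filter.mp hxmem).1
          have := hv x hxt
          simpa [List.take_succ_cons, hxa] using this

-- the distinct players at position q, in input order
def dposD (players : List (String × String)) (q : String) : List (String × String) :=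
  PySem.Set.ofList (players.filter (fun p => p.1 == q))

lemma fst_of_mem_dposD {players : List (String × String)} {q : String}
    {x : String × String} (hx : x ∈ dposD players q) : x.1 = q := by
  have h1 : x ∈ players.filter (fun p => p.1 == q) :=
    (PySem.Set.mem_ofList _ _).mp hx
  simpa using (List.mem_filter.mp h1).2

lemma fst_of_mem_take_dposD {players : List (String × String)} {q : String} {n : Nat}
    {x : String × String} (hx : x ∈ (dposD players q).take n) : x.1 = q :=
  fst_of_mem_dposD (List.mem_of_mem_take hx)

-- A's behaviour on a block of k equal positions
lemma blockA (players : List (String × String)) (pos : String) :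
    ∀ (k j : Nat) (acc u0 : List (String × String)),
      (∀ x ∈ u0, x.1 ≠ pos) →
      (List.replicate k pos).foldl (aStep players) (acc, u0 ++ (dposD players pos).take j)
        = (acc ++ ((dposD players pos).drop j).take k,
           u0 ++ (dposD players pos).take (j + k)) := by
  intro k
  induction k with
  | zero => intro j acc u0 _; simp
  | succ k ih =>
    intro j acc u0 hu0
    rw [List.replicate_succ, List.foldl_cons]
    have hfind : players.find?
        (fun p => p.1 == pos && !(PySem.Set.contains (u0 ++ (dposD players pos).take j) p))
        = (dposD players pos)[j]? := by
      show players.find?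
        (fun p => p.1 == pos && !((u0 ++ (dposD players pos).take j).contains p))
        = (dposD players pos)[j]?
      rw [find?_conj]
      unfold dposD
      apply find_dedup (players.filter (fun p => p.1 == pos)).length _ le_rfl
      intro x hxmem
      have hx1 : x.1 = pos := by simpa using (List.mem_filter.mp hxmem).2
      constructor
      · intro hc
        have hxin : x ∈ u0 ++ (dposD players pos).take j := by
          simpa using hc
        rcases List.mem_append.mp hxin with h | h
        · exact absurd hx1 (hu0 x h)
        · simpa [dposD] using h
      · intro hx
        have : x ∈ u0 ++ (dposD players pos).take j := by
          apply List.mem_append.mpr; right; simpa [dposD] using hx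
        simpa using this
    by_cases hj : j < (dposD players pos).length
    · have hfind' : players.find?
          (fun p => p.1 == pos && !(PySem.Set.contains (u0 ++ (dposD players pos).take j) p))
          = some (dposD players pos)[j] := by
        rw [hfind, List.getElem?_eq_getElem hj]
      set p := (dposD players pos)[j] with hp
      have hpD : p ∈ dposD players pos := List.getElem_mem hj
      have hp1 : p.1 = pos := fst_of_mem_dposD hpD
      have hpnotin : p ∉ u0 ++ (dposD players pos).take j := by
        intro hmem
        rcases List.mem_append.mp hmem with h | h
        · exact (hu0 p h) hp1
        · have hnd : (dposD players pos).Nodup := PySem.Set.nodup_ofList _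
          rcases List.mem_take_iff_getElem.mp h with ⟨i, hi, hie⟩
          have hij : i ≠ j := by omega
          exact hij (List.Nodup.getElem_inj_iff hnd |>.mp (by rw [hie]))
      have hadd : PySem.Set.add (u0 ++ (dposD players pos).take j) p
          = u0 ++ (dposD players pos).take (j + 1) := by
        simp only [PySem.Set.add]
        rw [if_neg (by simpa using hpnotin)]
        rw [List.append_assoc]
        congr 1
        rw [List.take_add_one, List.getElem?_eq_getElem hj]
        rfl
      have hstep : aStep players (acc, u0 ++ (dposD players pos).take j) pos
          = (acc ++ [p], u0 ++ (dposD players pos).take (j + 1)) := by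
        simp only [aStep, hfind']
        rw [hadd]
      rw [hstep, ih (j + 1) (acc ++ [p]) u0 hu0]
      rw [Prod.mk.injEq]
      constructor
      · rw [List.append_assoc]
        congr 1
        rw [List.drop_eq_getElem_cons hj, List.take_succ_cons]
        rfl
      · rw [show j + 1 + k = j + (k + 1) from by omega]
    · have hfind' : players.find?
          (fun p => p.1 == pos && !(PySem.Set.contains (u0 ++ (dposD players pos).take j) p))
          = none := by
        rw [hfind, List.getElem?_eq_none_iff]; omega
      have hstep : aStep players (acc, u0 ++ (dposD players pos).take j) pos
          = (acc, u0 ++ (dposD players pos).take j) := by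
        simp only [aStep, hfind']
      rw [hstep, ih j acc u0 hu0]
      have hge : (dposD players pos).length ≤ j := by omega
      rw [List.drop_eq_nil_of_le hge]
      simp only [List.take_nil]
      congr 2
      rw [List.take_of_length_le (le_trans hge (by omega)),
        List.take_of_length_le (le_trans hge (by omega))]

-- blockA with j = 0, in the shape the assembly uses
lemma blockA0 (players : List (String × String)) (pos : String)
    (k : Nat) (acc u0 : List (String × String)) (hu0 : ∀ x ∈ u0, x.1 ≠ pos) :
    (List.replicate k pos).foldl (aStep players) (acc, u0)
      = (acc ++ (dposD players pos).take k, u0 ++ (dposD players pos).take k) := by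
  have := blockA players pos k 0 acc u0 hu0
  simpa using this

-- ===== VERDICT (by name: the statement is the Claim_ definition above) =====
theorem order_lineup_spec : Claim_equal_order_lineup := by
  intro players _
  show order_lineup players = order_lineup_alt players
  unfold order_lineup
  have hsplit : dfsOrder
      = List.replicate 1 "QB" ++ List.replicate 2 "RB" ++ List.replicate 3 "WR"
        ++ List.replicate 1 "TE" ++ List.replicate 1 "FLEX" ++ List.replicate 1 "DST" := rfl
  rw [hsplit, List.foldl_append, List.foldl_append, List.foldl_append,
    List.foldl_append, List.foldl_append]
  have hempty : (([], PySem.Set.empty) :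
      List (String × String) × PySem.Set (String × String)) = ([], []) := rfl
  rw [hempty]
  rw [blockA0 players "QB" 1 [] [] (by simp)]
  rw [blockA0 players "RB" 2 _ _ (by
    intro x hx
    rw [fst_of_mem_take_dposD hx]; decide)]
  rw [blockA0 players "WR" 3 _ _ (by
    intro x hx
    rcases List.mem_append.mp hx with h | h
    · rw [fst_of_mem_take_dposD h]; decide
    · rw [fst_of_mem_take_dposD h]; decide)]
  rw [blockA0 players "TE" 1 _ _ (by
    intro x hx
    rcases List.mem_append.mp hx with h | h
    · rcases List.mem_append.mp h with h' | h'
      · rw [fst_of_mem_take_dposD h']; decide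
      · rw [fst_of_mem_take_dposD h']; decide
    · rw [fst_of_mem_take_dposD h]; decide)]
  rw [blockA0 players "FLEX" 1 _ _ (by
    intro x hx
    rcases List.mem_append.mp hx with h | h
    · rcases List.mem_append.mp h with h' | h'
      · rcases List.mem_append.mp h' with h'' | h''
        · rw [fst_of_mem_take_dposD h'']; decide
        · rw [fst_of_mem_take_dposD h'']; decide
      · rw [fst_of_mem_take_dposD h']; decide
    · rw [fst_of_mem_take_dposD h]; decide)]
  rw [blockA0 players "DST" 1 _ _ (by
    intro x hx
    rcases List.mem_append.mp hx with h | h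
    · rcases List.mem_append.mp h with h' | h'
      · rcases List.mem_append.mp h' with h'' | h''
        · rcases List.mem_append.mp h'' with h3 | h3
          · rw [fst_of_mem_take_dposD h3]; decide
          · rw [fst_of_mem_take_dposD h3]; decide
        · rw [fst_of_mem_take_dposD h'']; decide
      · rw [fst_of_mem_take_dposD h']; decide
    · rw [fst_of_mem_take_dposD h]; decide)]
  show ([] : List (String × String)) ++ (dposD players "QB").take 1
      ++ (dposD players "RB").take 2 ++ (dposD players "WR").take 3
      ++ (dposD players "TE").take 1 ++ (dposD players "FLEX").take 1
      ++ (dposD players "DST").take 1 = order_lineup_alt players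
  unfold order_lineup_alt slotCounts
  simp only [List.foldl_cons, List.foldl_nil, PySem.List.dedup_eq_ofList]
  simp only [filter_ofList]
  rfl
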